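-- pv_equiv track=rewrite | github.com/Minerstove/Python | cs11/Practice2.py | zigzags
-- ===== SOURCE A (Python) =====
-- def zigzags(seq):
--     n = len(seq)
--     return frozenset(
--         (seq[i], seq[j], seq[k])
--         for i in range(n-3)
--         for j in range(i+1,n-2)
--         for k in range(j+1,n-1)
--         if (seq[i] <= seq[j] >= seq[k]) or (seq[i] >= seq[j] <= seq[k])
--     )
-- ===== SOURCE B (Python) =====
-- def zigzags(seq):
--     # Distinct-suffix table: one backward pass pairs each position with the
--     # distinct values occurring after it, so the innermost scan runs over
--     # distinct values only and results accumulate in a seen-set.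
--     xs = seq[:-1]                  # the last element never participates
--     rows = []
--     ds = []
--     for x in reversed(xs):
--         rows.append((x, ds))
--         ds = [x] + [v for v in ds if v != x]
--     rows.reverse()                 # rows[p] = (xs[p], distinct values of xs[p+1:])
--     out = set()
--     rest = rows
--     while len(rest) >= 3:
--         a = rest[0][0]
--         for b, d in rest[1:-1]:
--             if a < b:
--                 for c in d:
--                     if c <= b:
--                         out.add((a, b, c))
--             elif b < a:
--                 for c in d:
--                     if b <= c:
--                         out.add((a, b, c))
--             else:
--                 for c in d:
--                     out.add((a, b, c))
--         rest = rest[1:]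
--     return frozenset(out)
-- ===== Notes on version B (the rewrite author's own statement) =====
-- stated objective: alternative
-- what changed: Instead of testing the zigzag condition on every (i,j,k) index triple, B precomputes in one backward pass a distinct-suffix table (each position paired with the ordered distinct values after it) and, per (i,j) pair, filters that distinct-value list once and accumulates triples into a seen-set; the inner scan runs over distinct values only.
import Mathlib
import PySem

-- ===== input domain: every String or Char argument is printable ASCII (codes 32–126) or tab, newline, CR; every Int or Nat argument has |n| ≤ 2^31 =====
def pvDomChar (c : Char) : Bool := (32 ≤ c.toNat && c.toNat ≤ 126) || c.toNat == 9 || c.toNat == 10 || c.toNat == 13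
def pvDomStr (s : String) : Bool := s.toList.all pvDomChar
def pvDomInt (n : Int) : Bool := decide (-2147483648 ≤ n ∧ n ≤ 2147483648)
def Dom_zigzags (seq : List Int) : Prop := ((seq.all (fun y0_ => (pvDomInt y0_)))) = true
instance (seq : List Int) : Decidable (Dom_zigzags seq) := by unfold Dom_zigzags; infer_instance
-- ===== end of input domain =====

-- B replaces the triple index-loop comprehension by a precomputed distinct-suffix
-- table consumed per (i,j) pair, accumulating the triples into a seen-set (objective: alternative).

-- ===== PORT A =====
-- triple nested index comprehension filtered by the zigzag condition, then frozenset
def zigzags (seq : List Int) : List (Int × Int × Int) :=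
  let n : Int := seq.length
  PySem.Set.ofList
    ((PySem.List.pyRange 0 (n - 3) 1).flatMap (fun i =>
      (PySem.List.pyRange (i + 1) (n - 2) 1).flatMap (fun j =>
        (PySem.List.pyRange (j + 1) (n - 1) 1).filterMap (fun k =>
          let a := PySem.List.pyGetD seq i 0
          let b := PySem.List.pyGetD seq j 0
          let c := PySem.List.pyGetD seq k 0
          if (a ≤ b ∧ c ≤ b) ∨ (b ≤ a ∧ b ≤ c) then some (a, b, c) else none))))

-- ===== PORT B =====
-- ds-step of the backward pass: the distinct values after a position, read off the next row
def zzDs (r : List (Int × List Int)) : List Int :=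
  match r with
  | [] => []
  | (y, d) :: _ => y :: d.filter (fun v => decide (v ≠ y))

-- the backward pass over reversed(xs): rows[p] = (xs[p], distinct values of xs[p+1:])
def zzRows : List Int → List (Int × List Int)
  | [] => []
  | x :: t => (x, zzDs (zzRows t)) :: zzRows t

-- inner for loop over rest[1:-1]: per (b, d) filter the distinct list once, add the triples
def zzInnerB (a : Int) : List (Int × List Int) → PySem.Set (Int × Int × Int) → PySem.Set (Int × Int × Int)
  | [], out => out
  | (b, d) :: mid, out =>
    zzInnerB a mid (PySem.Set.update out
      (if a < b then (d.filter (fun c => decide (c ≤ b))).map (fun c => (a, b, c))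
       else if b < a then (d.filter (fun c => decide (b ≤ c))).map (fun c => (a, b, c))
       else d.map (fun c => (a, b, c))))

-- outer while loop: a = rest[0][0], iterate rest[1:-1], rest = rest[1:], stop when len(rest) < 3
def zzOuterB : List (Int × List Int) → PySem.Set (Int × Int × Int) → PySem.Set (Int × Int × Int)
  | [], out => out
  | r :: tl, out => if tl.length < 2 then out else zzOuterB tl (zzInnerB r.1 tl.dropLast out)

def zigzags_alt (seq : List Int) : List (Int × Int × Int) :=
  zzOuterB (zzRows (PySem.List.slice seq none (some (-1)))) PySem.Set.empty

-- ===== PRECONDITION & SPEC =====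
def Spec_zigzags (seq : List Int) (out : List (Int × Int × Int)) : Prop := out = zigzags_alt seq
instance (seq : List Int) (out : List (Int × Int × Int)) : Decidable (Spec_zigzags seq out) := by unfold Spec_zigzags; infer_instance

-- ===== CLAIM (what is proved, stated in full; the proofs are below) =====
def Claim_equal_zigzags : Prop := ∀ (seq : List Int), Dom_zigzags seq → Spec_zigzags seq (zigzags seq)

-- ===== LEMMAS AND PROOFS =====

-- the filtered triple A's comprehension emits
def zzEmit (a b c : Int) : Option (Int × Int × Int) :=
  if (a ≤ b ∧ c ≤ b) ∨ (b ≤ a ∧ b ≤ c) then some (a, b, c) else none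

-- A's two inner loops, re-indexed over an arbitrary list (intended: a suffix of seq.dropLast)
def chainT2 (a : Int) (ys : List Int) : List (Int × Int × Int) :=
  (PySem.List.pyRange 0 ((ys.length : Int) - 1) 1).flatMap (fun j =>
    (PySem.List.pyRange (j + 1) (ys.length : Int) 1).filterMap (fun k =>
      zzEmit a (PySem.List.pyGetD ys j 0) (PySem.List.pyGetD ys k 0)))

-- A's whole chain over xs (intended: xs = seq.dropLast)
def chainT (xs : List Int) : List (Int × Int × Int) :=
  (PySem.List.pyRange 0 ((xs.length : Int) - 2) 1).flatMap (fun i =>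
    (PySem.List.pyRange (i + 1) ((xs.length : Int) - 1) 1).flatMap (fun j =>
      (PySem.List.pyRange (j + 1) (xs.length : Int) 1).filterMap (fun k =>
        zzEmit (PySem.List.pyGetD xs i 0) (PySem.List.pyGetD xs j 0) (PySem.List.pyGetD xs k 0))))

-- structural form of A's inner two loops over a concrete suffix
def zzInner (a : Int) : List Int → List (Int × Int × Int)
  | [] => []
  | [_] => []
  | b :: after =>
    (if a < b then (after.filter (fun c => c ≤ b)).map (fun c => (a, b, c))
     else if b < a then (after.filter (fun c => b ≤ c)).map (fun c => (a, b, c))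
     else after.map (fun c => (a, b, c))) ++ zzInner a after

-- structural form of A's whole chain
def zzGo : List Int → List (Int × Int × Int)
  | [] => []
  | a :: tail => if tail.length < 2 then [] else zzInner a tail ++ zzGo tail

theorem getD_shift (x : Int) (t : List Int) (i : Int) (hi : 0 ≤ i) (d : Int) :
    PySem.List.pyGetD (x :: t) (i + 1) d = PySem.List.pyGetD t i d := by
  obtain ⟨n, rfl⟩ := Int.eq_ofNat_of_zero_le hi
  have h : ((n : Int) + 1) = ((n + 1 : Nat) : Int) := by push_cast; ring
  rw [h, PySem.List.pyGetD_natCast, PySem.List.pyGetD_natCast]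
  rfl

theorem pr_shift (a b : Int) :
    PySem.List.pyRange (a + 1) (b + 1) 1 = (PySem.List.pyRange a b 1).map (· + 1) := by
  rw [PySem.List.pyRange_one, PySem.List.pyRange_one, List.map_map]
  have h : (b + 1 - (a + 1)) = b - a := by ring
  rw [h]
  apply List.map_congr_left
  intro k _
  simp only [Function.comp_apply]
  omega

theorem fm_shift {γ : Type} (lo hi : Int) (g : Int → Option γ) :
    (PySem.List.pyRange (lo + 1) (hi + 1) 1).filterMap g
      = (PySem.List.pyRange lo hi 1).filterMap (fun k => g (k + 1)) := by
  rw [pr_shift, List.filterMap_map]; rfl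

theorem bm_shift {γ : Type} (lo hi : Int) (g : Int → List γ) :
    (PySem.List.pyRange (lo + 1) (hi + 1) 1).flatMap g
      = (PySem.List.pyRange lo hi 1).flatMap (fun k => g (k + 1)) := by
  rw [pr_shift, List.flatMap_map]

theorem fm_getD {γ : Type} (u : List Int) (g : Int → Option γ) :
    (PySem.List.pyRange 0 (u.length : Int) 1).filterMap (fun k => g (PySem.List.pyGetD u k 0))
      = u.filterMap g := by
  have h : (fun k => g (PySem.List.pyGetD u k 0))
      = g ∘ (fun k => PySem.List.pyGetD u k 0) := rfl
  rw [h, ← List.filterMap_map, PySem.List.map_pyGetD_pyRange_zero']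

-- the inner emission stream equals the branch-per-(a,b) form
theorem branch_eq (a b : Int) (u : List Int) :
    (if a < b then (u.filter (fun c => c ≤ b)).map (fun c => (a, b, c))
     else if b < a then (u.filter (fun c => b ≤ c)).map (fun c => (a, b, c))
     else u.map (fun c => (a, b, c)))
      = u.filterMap (fun c => zzEmit a b c) := by
  induction u with
  | nil => split_ifs <;> rfl
  | cons c u ih =>
    rcases lt_trichotomy a b with h | h | h
    · have hba : ¬ b ≤ a := by omega
      have hab : a ≤ b := by omega
      simp only [if_pos h] at ih ⊢
      by_cases hc : c ≤ b <;>
        simp [zzEmit, hc, hba, hab, ih]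
    · subst h
      rw [if_neg (lt_irrefl a), if_neg (lt_irrefl a)] at ih ⊢
      have hC : ∀ z : Int, (a ≤ a ∧ z ≤ a) ∨ (a ≤ a ∧ a ≤ z) := fun z => by omega
      simp only [List.map_cons, List.filterMap_cons, zzEmit, if_pos (hC c), ih]
    · have hna : ¬ a < b := by omega
      have hba : b ≤ a := by omega
      have hab : ¬ a ≤ b := by omega
      rw [if_neg hna, if_pos h] at ih ⊢
      by_cases hc : b ≤ c <;>
        simp [zzEmit, hc, hba, hab, ih]

theorem chainT2_eq_zzInner (a : Int) (ys : List Int) : chainT2 a ys = zzInner a ys := by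
  induction ys with
  | nil => rfl
  | cons b u ih =>
    rcases u with _ | ⟨c, v⟩
    · rfl
    · set u := c :: v with hu
      have hpos : (0 : Int) < (u.length : Int) := by simp [hu]
      unfold chainT2
      have h1 : (((b :: u).length : Int) - 1) = (u.length : Int) := by simp
      rw [h1, PySem.List.pyRange_one_cons hpos, List.flatMap_cons]
      have hhead :
          (PySem.List.pyRange (0 + 1) (((b :: u).length : Int)) 1).filterMap (fun k =>
            zzEmit a (PySem.List.pyGetD (b :: u) 0 0) (PySem.List.pyGetD (b :: u) k 0))
          = u.filterMap (fun c => zzEmit a b c) := by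
        rw [show (((b :: u).length : Int)) = (u.length : Int) + 1 from by simp, fm_shift]
        rw [List.filterMap_congr (g := fun k => zzEmit a b (PySem.List.pyGetD u k 0)) ?_]
        · exact fm_getD u (fun c => zzEmit a b c)
        · intro k hk
          have hk0 : 0 ≤ k := ((PySem.List.mem_pyRange_one).1 hk).1
          rw [getD_shift _ _ _ hk0, PySem.List.pyGetD_zero_cons]
      have htail :
          (PySem.List.pyRange (0 + 1) ((u.length : Int)) 1).flatMap (fun j =>
            (PySem.List.pyRange (j + 1) (((b :: u).length : Int)) 1).filterMap (fun k =>
              zzEmit a (PySem.List.pyGetD (b :: u) j 0) (PySem.List.pyGetD (b :: u) k 0)))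
          = chainT2 a u := by
        rw [show (PySem.List.pyRange (0 + 1) ((u.length : Int)) 1)
              = (PySem.List.pyRange (0 + 1) (((u.length : Int) - 1) + 1) 1) from by
            rw [sub_add_cancel]]
        rw [bm_shift]
        unfold chainT2
        apply List.flatMap_congr
        intro j hj
        have hj0 : 0 ≤ j := ((PySem.List.mem_pyRange_one).1 hj).1
        rw [getD_shift _ _ _ hj0]
        rw [show (((b :: u).length : Int)) = (u.length : Int) + 1 from by simp, fm_shift]
        apply List.filterMap_congr
        intro k hk
        have hk0 : 0 ≤ k := by
          have := ((PySem.List.mem_pyRange_one).1 hk).1; omega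
        rw [getD_shift _ _ _ hk0]
      rw [hhead, htail, ih, ← branch_eq]
      rfl

theorem chainT_eq_zzGo (xs : List Int) : chainT xs = zzGo xs := by
  induction xs with
  | nil => rfl
  | cons x t ih =>
    by_cases hlt : t.length < 2
    · have h0 : ((x :: t).length : Int) - 2 ≤ 0 := by simp; omega
      unfold chainT
      rw [PySem.List.pyRange_one_eq_nil h0]
      simp [zzGo, hlt]
    · have hpos : (0 : Int) < ((x :: t).length : Int) - 2 := by simp; omega
      unfold chainT
      rw [PySem.List.pyRange_one_cons hpos, List.flatMap_cons]
      have hhead :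
          (PySem.List.pyRange (0 + 1) (((x :: t).length : Int) - 1) 1).flatMap (fun j =>
            (PySem.List.pyRange (j + 1) (((x :: t).length : Int)) 1).filterMap (fun k =>
              zzEmit (PySem.List.pyGetD (x :: t) 0 0) (PySem.List.pyGetD (x :: t) j 0)
                (PySem.List.pyGetD (x :: t) k 0)))
          = chainT2 x t := by
        rw [show (((x :: t).length : Int) - 1) = ((t.length : Int) - 1) + 1 from by
              push_cast [List.length_cons]; ring]
        rw [bm_shift]
        unfold chainT2
        apply List.flatMap_congr
        intro j hj
        have hj0 : 0 ≤ j := ((PySem.List.mem_pyRange_one).1 hj).1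
        rw [PySem.List.pyGetD_zero_cons, getD_shift _ _ _ hj0]
        rw [show (((x :: t).length : Int)) = (t.length : Int) + 1 from by simp, fm_shift]
        apply List.filterMap_congr
        intro k hk
        have hk0 : 0 ≤ k := by
          have := ((PySem.List.mem_pyRange_one).1 hk).1; omega
        rw [getD_shift _ _ _ hk0]
      have htail :
          (PySem.List.pyRange (0 + 1) (((x :: t).length : Int) - 2) 1).flatMap (fun i =>
            (PySem.List.pyRange (i + 1) (((x :: t).length : Int) - 1) 1).flatMap (fun j =>
              (PySem.List.pyRange (j + 1) (((x :: t).length : Int)) 1).filterMap (fun k =>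
                zzEmit (PySem.List.pyGetD (x :: t) i 0) (PySem.List.pyGetD (x :: t) j 0)
                  (PySem.List.pyGetD (x :: t) k 0))))
          = chainT t := by
        rw [show (((x :: t).length : Int) - 2) = ((t.length : Int) - 2) + 1 from by
              push_cast [List.length_cons]; ring]
        rw [bm_shift]
        unfold chainT
        apply List.flatMap_congr
        intro i hi
        have hi0 : 0 ≤ i := ((PySem.List.mem_pyRange_one).1 hi).1
        rw [getD_shift _ _ _ hi0]
        rw [show (((x :: t).length : Int) - 1) = ((t.length : Int) - 1) + 1 from by
              push_cast [List.length_cons]; ring]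
        rw [bm_shift]
        apply List.flatMap_congr
        intro j hj
        have hj0 : 0 ≤ j := by
          have := ((PySem.List.mem_pyRange_one).1 hj).1; omega
        rw [getD_shift _ _ _ hj0]
        rw [show (((x :: t).length : Int)) = (t.length : Int) + 1 from by simp, fm_shift]
        apply List.filterMap_congr
        intro k hk
        have hk0 : 0 ≤ k := by
          have := ((PySem.List.mem_pyRange_one).1 hk).1; omega
        rw [getD_shift _ _ _ hk0]
      rw [hhead, htail, ih, chainT2_eq_zzInner]
      simp [zzGo, hlt]

theorem getD_dropLast (xs : List Int) (i : Int) (hi : 0 ≤ i) (h : i < (xs.length : Int) - 1) (d : Int) :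
    PySem.List.pyGetD xs.dropLast i d = PySem.List.pyGetD xs i d := by
  obtain ⟨n, rfl⟩ := Int.eq_ofNat_of_zero_le hi
  rw [PySem.List.pyGetD_natCast, PySem.List.pyGetD_natCast]
  have hn : n < xs.length - 1 := by omega
  simp only [List.getD]
  rw [List.getElem?_eq_getElem (l := xs.dropLast) (by simp; omega),
      List.getElem?_eq_getElem (l := xs) (by omega)]
  simp [List.getElem_dropLast]

theorem zigzags_eq_chainT (seq : List Int) :
    zigzags seq = PySem.Set.ofList (chainT seq.dropLast) := by
  rcases seq with _ | ⟨y, ys⟩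
  · rfl
  · simp only [zigzags, chainT]
    congr 1
    have hm : (((y :: ys).dropLast.length : Int)) = (((y :: ys).length : Int)) - 1 := by
      rw [List.length_dropLast]
      have h1 : 1 ≤ (y :: ys).length := by simp
      omega
    rw [hm]
    rw [show ((((y :: ys).length : Int)) - 1 - 2) = (((y :: ys).length : Int)) - 3 from by ring]
    rw [show ((((y :: ys).length : Int)) - 1 - 1) = (((y :: ys).length : Int)) - 2 from by ring]
    apply List.flatMap_congr
    intro i hi
    obtain ⟨hi0, hiu⟩ := (PySem.List.mem_pyRange_one).1 hi
    apply List.flatMap_congr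
    intro j hj
    obtain ⟨hj0, hju⟩ := (PySem.List.mem_pyRange_one).1 hj
    apply List.filterMap_congr
    intro k hk
    obtain ⟨hk0, hku⟩ := (PySem.List.mem_pyRange_one).1 hk
    simp only [zzEmit]
    rw [getD_dropLast _ _ hi0 (by omega), getD_dropLast _ _ (by omega) (by omega),
        getD_dropLast _ _ (by omega) (by omega)]

-- ===== B-side lemmas =====

-- the recurrence the backward pass satisfies, materialised as a function of the suffix
def zzD : List Int → List Int
  | [] => []
  | x :: t => x :: (zzD t).filter (fun v => decide (v ≠ x))

theorem zzDs_zzRows (t : List Int) : zzDs (zzRows t) = zzD t := by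
  induction t with
  | nil => rfl
  | cons x t ih => simp only [zzRows, zzDs, zzD, ← ih]

theorem length_zzRows (t : List Int) : (zzRows t).length = t.length := by
  induction t with
  | nil => rfl
  | cons x t ih => simp [zzRows, ih]

-- adding an element already present is a no-op
theorem add_of_mem (S : PySem.Set (Int × Int × Int)) (x : Int × Int × Int) (hx : x ∈ S) :
    PySem.Set.add S x = S := by
  simp only [PySem.Set.add]
  rw [if_pos]
  exact List.elem_eq_true_of_mem hx

-- update skips copies of an element the set already holds
theorem upd_filter_mem (x : Int × Int × Int) :
    ∀ (l : List (Int × Int × Int)) (S : PySem.Set (Int × Int × Int)), x ∈ S →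
      PySem.Set.update S (l.filter (fun v => decide (v ≠ x))) = PySem.Set.update S l := by
  intro l
  induction l with
  | nil => intro S _; rfl
  | cons y l ih =>
    intro S hx
    by_cases hy : y = x
    · subst hy
      simp only [List.filter_cons, decide_eq_true_eq]
      rw [if_neg (by simp)]
      have : PySem.Set.update S (y :: l) = PySem.Set.update (PySem.Set.add S y) l := rfl
      rw [this, add_of_mem S y hx, ih S hx]
    · simp only [List.filter_cons, decide_eq_true_eq, if_pos hy]
      have h1 : PySem.Set.update S (y :: l.filter (fun v => decide (v ≠ x)))
          = PySem.Set.update (PySem.Set.add S y) (l.filter (fun v => decide (v ≠ x))) := rfl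
      have h2 : PySem.Set.update S (y :: l) = PySem.Set.update (PySem.Set.add S y) l := rfl
      rw [h1, h2, ih _ ((PySem.Set.mem_add S y x).2 (Or.inl hx))]

theorem map_filter_ne (a b x : Int) (l : List Int) :
    (l.filter (fun v => decide (v ≠ x))).map (fun c => (a, b, c))
      = (l.map (fun c => (a, b, c))).filter (fun w => decide (w ≠ (a, b, x))) := by
  rw [List.filter_map]
  congr 1
  apply List.filter_congr
  intro c _
  simp [Function.comp, Prod.ext_iff]

-- the block over t's raw values updates a set exactly like the block over t's distinct values
theorem upd_block (a b : Int) (p : Int → Bool) :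
    ∀ (t : List Int) (S : PySem.Set (Int × Int × Int)),
      PySem.Set.update S ((t.filter p).map (fun c => (a, b, c)))
        = PySem.Set.update S (((zzD t).filter p).map (fun c => (a, b, c))) := by
  intro t
  induction t with
  | nil => intro S; rfl
  | cons x t ih =>
    intro S
    have hcomm : ((zzD t).filter (fun v => decide (v ≠ x))).filter p
        = ((zzD t).filter p).filter (fun v => decide (v ≠ x)) := by
      rw [List.filter_filter, List.filter_filter]
      apply List.filter_congr
      intro v _
      exact Bool.and_comm _ _
    by_cases hp : p x = true
    · simp only [zzD, List.filter_cons, hp, if_pos, List.map_cons]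
      rw [hcomm]
      have h1 : ∀ (l : List Int),
          PySem.Set.update S ((a, b, x) :: l.map (fun c => (a, b, c)))
            = PySem.Set.update (PySem.Set.add S (a, b, x)) (l.map (fun c => (a, b, c))) := by
        intro l; rfl
      rw [h1, h1, ih, map_filter_ne,
          upd_filter_mem (a, b, x) _ _ ((PySem.Set.mem_add S (a, b, x) (a, b, x)).2 (Or.inr rfl))]
    · have hp' : p x = false := by simpa using hp
      simp only [zzD, List.filter_cons, hp', if_neg, Bool.false_eq_true, not_false_iff]
      rw [hcomm]
      have hno : ((zzD t).filter p).filter (fun v => decide (v ≠ x)) = (zzD t).filter p := by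
        apply List.filter_eq_self.2
        intro v hv
        have hpv := List.of_mem_filter hv
        simp only [decide_eq_true_eq]
        intro hvx
        subst hvx
        rw [hp'] at hpv
        exact absurd hpv (by simp)
      rw [hno, ih]

-- one inner pass of the structural A-form equals B's inner loop over the rows
theorem upd_zzInner (a : Int) :
    ∀ (t : List Int) (S : PySem.Set (Int × Int × Int)),
      PySem.Set.update S (zzInner a t) = zzInnerB a ((zzRows t).dropLast) S := by
  intro t
  induction t with
  | nil => intro S; rfl
  | cons b u ih =>
    intro S
    rcases u with _ | ⟨c, v⟩
    · rfl
    · set u := c :: v with hu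
      have hrows : zzRows (b :: u) = (b, zzDs (zzRows u)) :: zzRows u := rfl
      have hne : zzRows u ≠ [] := by rw [hu]; simp [zzRows]
      have hdl : (zzRows (b :: u)).dropLast
          = (b, zzDs (zzRows u)) :: (zzRows u).dropLast := by
        rw [hrows, List.dropLast_cons_of_ne_nil hne]
      rw [hdl]
      have hinner : zzInner a (b :: u) =
          (if a < b then (u.filter (fun c => c ≤ b)).map (fun c => (a, b, c))
           else if b < a then (u.filter (fun c => b ≤ c)).map (fun c => (a, b, c))
           else u.map (fun c => (a, b, c))) ++ zzInner a u := by
        rw [hu]; rfl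
      rw [hinner, PySem.Set.update, List.foldl_append, ← PySem.Set.update, ← PySem.Set.update, ih]
      have hstep : ∀ (out : PySem.Set (Int × Int × Int)),
          zzInnerB a ((b, zzDs (zzRows u)) :: (zzRows u).dropLast) out
            = zzInnerB a ((zzRows u).dropLast) (PySem.Set.update out
                (if a < b then ((zzDs (zzRows u)).filter (fun c => decide (c ≤ b))).map (fun c => (a, b, c))
                 else if b < a then ((zzDs (zzRows u)).filter (fun c => decide (b ≤ c))).map (fun c => (a, b, c))
                 else (zzDs (zzRows u)).map (fun c => (a, b, c)))) := by
        intro out; rfl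
      rw [hstep]
      congr 1
      rw [zzDs_zzRows]
      rcases lt_trichotomy a b with h | h | h
      · rw [if_pos h, if_pos h]
        exact upd_block a b (fun c => decide (c ≤ b)) u S
      · have hna : ¬ a < b := by omega
        have hnb : ¬ b < a := by omega
        rw [if_neg hna, if_neg hna, if_neg hnb, if_neg hnb]
        have h1 : u.map (fun c => (a, b, c)) = (u.filter (fun _ => true)).map (fun c => (a, b, c)) := by
          rw [List.filter_true]
        have h2 : (zzD u).map (fun c => (a, b, c))
            = ((zzD u).filter (fun _ => true)).map (fun c => (a, b, c)) := by
          rw [List.filter_true]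
        rw [h1, h2]
        exact upd_block a b (fun _ => true) u S
      · have hna : ¬ a < b := by omega
        rw [if_neg hna, if_pos h, if_neg hna, if_pos h]
        exact upd_block a b (fun c => decide (b ≤ c)) u S

theorem upd_zzGo :
    ∀ (xs : List Int) (S : PySem.Set (Int × Int × Int)),
      PySem.Set.update S (zzGo xs) = zzOuterB (zzRows xs) S := by
  intro xs
  induction xs with
  | nil => intro S; rfl
  | cons a t ih =>
    intro S
    have hrows : zzRows (a :: t) = (a, zzDs (zzRows t)) :: zzRows t := rfl
    rw [hrows]
    by_cases hlt : t.length < 2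
    · have hlen : (zzRows t).length < 2 := by rw [length_zzRows]; exact hlt
      simp [zzGo, hlt, zzOuterB, hlen, PySem.Set.update]
    · have hlen : ¬ (zzRows t).length < 2 := by rw [length_zzRows]; exact hlt
      have hA : zzGo (a :: t) = zzInner a t ++ zzGo t := by simp [zzGo, hlt]
      have hB : zzOuterB ((a, zzDs (zzRows t)) :: zzRows t) S
          = zzOuterB (zzRows t) (zzInnerB a ((zzRows t).dropLast) S) := by
        simp [zzOuterB, hlen]
      rw [hA, hB, PySem.Set.update, List.foldl_append, ← PySem.Set.update, ← PySem.Set.update,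
          ih, upd_zzInner]

theorem zigzags_alt_eq (seq : List Int) :
    zigzags_alt seq = zzOuterB (zzRows seq.dropLast) PySem.Set.empty := by
  simp [zigzags_alt, PySem.List.slice_to_neg_one]

-- ===== VERDICT (by name: the statement is the Claim_ definition above) =====
theorem zigzags_spec : Claim_equal_zigzags := by
  intro seq _
  unfold Spec_zigzags
  rw [zigzags_eq_chainT, zigzags_alt_eq, chainT_eq_zzGo, ← upd_zzGo]
  rfl
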